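-- pv_equiv track=rewrite | github.com/Choi-jujuyeon/Python-CodingTest | 프로그래머스/2/42584. 주식가격/주식가격.py | solution
-- ===== SOURCE A (Python) =====
-- def solution(prices):
--     a = []
--     for i in range(len(prices)):
--         count=0
--         for j in range(i+1,len(prices)):
--             count+=1
--             if prices[i]>prices[j]:
--                 break
--         a.append(count)
--     return a
-- ===== SOURCE B (Python) =====
-- def solution(prices):
--     res = []
--     suffix = []
--     for p in reversed(prices):
--         k = 0
--         while k < len(suffix) and suffix[k] >= p:
--             k += 1
--         res.append(min(k + 1, len(suffix)))
--         suffix.insert(0, p)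
--     res.reverse()
--     return res
-- ===== Notes on version B (the rewrite author's own statement) =====
-- stated objective: alternative
-- what changed: B traverses the list right-to-left once, maintaining the explicit suffix of prices seen so far and computing each wait time as a takeWhile-length over that suffix (min(k+1, len)), instead of A's index-based nested forward scan with break.
import Mathlib
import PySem

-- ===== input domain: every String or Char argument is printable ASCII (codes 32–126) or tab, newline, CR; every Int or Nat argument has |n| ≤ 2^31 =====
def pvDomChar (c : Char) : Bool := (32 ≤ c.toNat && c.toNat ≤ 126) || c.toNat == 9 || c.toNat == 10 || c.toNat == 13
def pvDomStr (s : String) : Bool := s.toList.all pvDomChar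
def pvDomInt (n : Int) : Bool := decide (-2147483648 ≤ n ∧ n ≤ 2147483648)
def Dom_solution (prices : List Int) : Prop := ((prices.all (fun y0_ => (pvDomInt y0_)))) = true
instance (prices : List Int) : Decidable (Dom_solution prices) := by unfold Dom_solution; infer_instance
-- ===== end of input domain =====

-- B is an alternative implementation: one right-to-left traversal maintaining the explicit
-- suffix of prices, each wait time computed from that suffix; not claimed faster.

-- ===== PORT A =====
-- inner loop 'for j in range(i+1, len(prices)): count += 1; if prices[i] > prices[j]: break'
-- (j always in range, so getD 0 is exact)
def aInner (prices : List Int) (pi : Int) : List Nat → Int → Int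
  | [], count => count
  | j :: js, count =>
      let count := count + 1
      if pi > prices.getD j 0 then count else aInner prices pi js count

def solution (prices : List Int) : List Int :=
  (List.range prices.length).foldl
    (fun a i =>
      a ++ [aInner prices (prices.getD i 0) (List.range' (i + 1) (prices.length - (i + 1))) 0])
    []

-- ===== PORT B =====
-- 'k = 0; while k < len(suffix) and suffix[k] >= p: k += 1'
def bCount (p : Int) : List Int → Int
  | [] => 0
  | q :: s => if p ≤ q then 1 + bCount p s else 0

def solution_alt (prices : List Int) : List Int :=
  ((prices.reverse.foldl
      (fun (st : List Int × List Int) (p : Int) =>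
        let k := bCount p st.2
        (st.1 ++ [min (k + 1) (st.2.length : Int)], p :: st.2))
      ([], [])).1).reverse

-- ===== PRECONDITION & SPEC =====
def Spec_solution (prices : List Int) (out : List Int) : Prop := out = solution_alt prices
instance (prices : List Int) (out : List Int) : Decidable (Spec_solution prices out) := by unfold Spec_solution; infer_instance

-- ===== CLAIM (what is proved, stated in full; the proofs are below) =====
def Claim_equal_solution : Prop := ∀ (prices : List Int), Dom_solution prices → Spec_solution prices (solution prices)

-- ===== LEMMAS AND PROOFS =====

-- wait time of a price p against the list s of later prices
def wval (p : Int) (s : List Int) : Int := min (bCount p s + 1) (s.length : Int)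

-- answers of each element of l against its suffix inside l ++ s
def auxSpec (s : List Int) : List Int → List Int
  | [] => []
  | p :: rest => wval p (rest ++ s) :: auxSpec s rest

theorem wval_cons (p q : Int) (s : List Int) (h : p ≤ q) :
    wval p (q :: s) = 1 + wval p s := by
  simp only [wval, bCount, if_pos h, List.length_cons]
  omega

-- B's fold, generalized
theorem alt_fold (l : List Int) : ∀ (r s : List Int),
    l.reverse.foldl
      (fun (st : List Int × List Int) (p : Int) =>
        let k := bCount p st.2
        (st.1 ++ [min (k + 1) (st.2.length : Int)], p :: st.2))
      (r, s)
    = (r ++ (auxSpec s l).reverse, l ++ s) := by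
  induction l with
  | nil => simp [auxSpec]
  | cons p rest ih =>
      intro r s
      simp only [List.reverse_cons, List.foldl_append, ih, List.foldl_cons, List.foldl_nil,
        auxSpec, wval, List.reverse_cons, List.append_assoc, List.cons_append]

theorem alt_eq_auxSpec (prices : List Int) :
    solution_alt prices = auxSpec [] prices := by
  unfold solution_alt
  rw [alt_fold]
  simp

-- A's inner loop equals the wait time against the dropped suffix
theorem aInner_eq (l : List Int) (pi : Int) : ∀ (d : List Int) (j : Nat) (c : Int),
    l.drop j = d → aInner l pi (List.range' j d.length) c = c + wval pi d := by
  intro d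
  induction d with
  | nil => intro j c _; simp [aInner, wval, bCount]
  | cons q s ih =>
      intro j c hd
      have h0 : l[j]? = some q := by
        have h1 : l[j]? = (l.drop j)[0]? := by simp
        rw [h1, hd]; rfl
      have hq : l.getD j 0 = q := by simp [List.getD_eq_getElem?_getD, h0]
      have hs : l.drop (j + 1) = s := by
        have h2 := congrArg (List.drop 1) hd
        simpa [List.drop_drop, Nat.add_comm] using h2
      rw [List.length_cons, List.range'_succ]
      simp only [aInner, hq]
      by_cases hb : pi > q
      · rw [if_pos hb]
        have hw : wval pi (q :: s) = 1 := by
          simp only [wval, bCount, if_neg (show ¬ pi ≤ q by omega), List.length_cons]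
          omega
        rw [hw]
      · rw [if_neg hb]
        rw [ih (j + 1) (c + 1) hs, wval_cons pi q s (by omega)]
        ring

-- A equals auxSpec as well
theorem range_map_aux (l : List Int) :
    (List.range l.length).map
      (fun i => wval (l.getD i 0) (l.drop (i + 1))) = auxSpec [] l := by
  induction l with
  | nil => simp [auxSpec]
  | cons p rest ih =>
      rw [List.length_cons, List.range_succ_eq_map, List.map_cons, List.map_map]
      simp only [auxSpec, List.append_nil]
      have h1 : wval ((p :: rest).getD 0 0) ((p :: rest).drop (0 + 1)) = wval p rest := by simp
      rw [h1, ← ih]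
      rfl

theorem foldl_append_map {α β : Type} (g : α → β) (l : List α) : ∀ (acc : List β),
    l.foldl (fun a i => a ++ [g i]) acc = acc ++ l.map g := by
  induction l with
  | nil => simp
  | cons x xs ih => intro acc; simp [ih]

theorem sol_eq_auxSpec (prices : List Int) :
    solution prices = auxSpec [] prices := by
  rw [solution, foldl_append_map, List.nil_append, ← range_map_aux]
  apply List.map_congr_left
  intro i hi
  rw [List.mem_range] at hi
  have hlen : prices.length - (i + 1) = (prices.drop (i + 1)).length := by
    simp
  rw [hlen]
  simpa using aInner_eq prices (prices.getD i 0) (prices.drop (i + 1)) (i + 1) 0 rfl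

-- ===== VERDICT (by name: the statement is the Claim_ definition above) =====
theorem solution_spec : Claim_equal_solution := by
  intro prices _
  unfold Spec_solution
  rw [sol_eq_auxSpec, alt_eq_auxSpec]
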